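-- pv_equiv track=rewrite | github.com/mumuvrf/Academia-Python | Aula 5/soma_multiplos.py | soma_multiplos
-- ===== SOURCE A (Python) =====
-- def soma_multiplos(a, b):
--     i = 0
--     soma = 0
--
--     while(i <= max(a, b)*10):
--         if(i%a == 0): soma += i
--         elif(i%b == 0): soma += i
--         i += 1
--
--     return soma
-- ===== SOURCE B (Python) =====
-- def soma_multiplos(a, b):
--     # Closed form: inclusion-exclusion over multiples of |a|, |b| and their lcm,
--     # each summed with the arithmetic-series formula (O(1) instead of O(max(a,b))).
--     n = max(a, b) * 10
--     if n < 0: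
--         return 0
--     x = abs(a)
--     y = abs(b)
--     g = x
--     r = y
--     while r:
--         g, r = r, g % r
--     l = x * y // g
--     def tri(d):
--         k = n // d
--         return d * k * (k + 1) // 2
--     return tri(x) + tri(y) - tri(l)
-- ===== Notes on version B (the rewrite author's own statement) =====
-- stated objective: faster
-- what changed: Replaced the O(max(a,b)) counting loop by an O(1) inclusion-exclusion closed form: arithmetic-series sums of the multiples of |a|, |b| and lcm(|a|,|b|) up to max(a,b)*10.
-- outside the precondition, e.g. on soma_multiplos(1, 0): A returns 55, B raises ZeroDivisionError; on soma_multiplos(-2, 0): A returns 0, B raises ZeroDivisionError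
import Mathlib
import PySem

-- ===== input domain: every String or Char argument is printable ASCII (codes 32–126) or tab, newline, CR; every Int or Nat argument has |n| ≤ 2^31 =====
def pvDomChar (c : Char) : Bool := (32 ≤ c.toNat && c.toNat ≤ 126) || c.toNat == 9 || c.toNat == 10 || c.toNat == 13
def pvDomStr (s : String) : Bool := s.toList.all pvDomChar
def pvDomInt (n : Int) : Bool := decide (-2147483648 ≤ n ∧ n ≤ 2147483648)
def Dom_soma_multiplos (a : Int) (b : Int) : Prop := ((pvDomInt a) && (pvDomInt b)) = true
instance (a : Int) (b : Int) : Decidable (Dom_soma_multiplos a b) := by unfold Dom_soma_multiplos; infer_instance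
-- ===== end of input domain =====

-- B replaces A's counting loop by an inclusion-exclusion closed form
-- (arithmetic-series sums over the multiples of |a|, |b| and lcm(|a|,|b|)).

-- ===== PORT A =====
-- 'i = 0; while i <= max(a,b)*10: …; i += 1'  =  fold over range(0, max(a,b)*10 + 1)
def soma_multiplos (a : Int) (b : Int) : Int :=
  (PySem.List.pyRange 0 (max a b * 10 + 1) 1).foldl
    (fun soma i =>
      if PySem.Int.mod i a = 0 then soma + i
      else if PySem.Int.mod i b = 0 then soma + i
      else soma) 0

-- ===== PORT B =====
-- Source B's Euclid loop: 'while r: g, r = r, g % r'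
def pvGcdLoop (g : Int) (r : Int) : Int :=
  if h : r = 0 then g else pvGcdLoop r (PySem.Int.mod g r)
termination_by r.natAbs
decreasing_by
  rcases lt_or_gt_of_ne h with hr | hr
  · have h1 := PySem.Int.mod_neg_bounds (a := g) hr
    omega
  · have h1 := PySem.Int.mod_nonneg (a := g) hr
    have h2 := PySem.Int.mod_lt (a := g) hr
    omega

-- Source B's tri(d): 'k = n // d; return d * k * (k + 1) // 2'
def pvTri (n : Int) (d : Int) : Int :=
  PySem.Int.floordiv (d * PySem.Int.floordiv n d * (PySem.Int.floordiv n d + 1)) 2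

-- Source B's locals x=abs(a), y=abs(b), g (Euclid), l = x*y//g are inlined here
def soma_multiplos_alt (a : Int) (b : Int) : Int :=
  if max a b * 10 < 0 then 0
  else
    pvTri (max a b * 10) |a| + pvTri (max a b * 10) |b|
      - pvTri (max a b * 10) (PySem.Int.floordiv (|a| * |b|) (pvGcdLoop |a| |b|))

-- ===== PRECONDITION & SPEC =====
-- Pre_ excludes a = 0 or b = 0: there Python A raises ZeroDivisionError on 'i % a' / 'i % b',
-- except on a few accidental corners (e.g. b = 0 with a = 1 or with a < 0) where the raising
-- branch happens never to be reached; B's gcd/lcm closed form raises ZeroDivisionError on all of them.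
def Pre_soma_multiplos (a : Int) (b : Int) : Prop := a ≠ 0 ∧ b ≠ 0
instance (a : Int) (b : Int) : Decidable (Pre_soma_multiplos a b) := by unfold Pre_soma_multiplos; infer_instance
def pvWitness_soma_multiplos : Int × Int := (3, 4)

def Spec_soma_multiplos (a : Int) (b : Int) (out : Int) : Prop := out = soma_multiplos_alt a b
instance (a : Int) (b : Int) (out : Int) : Decidable (Spec_soma_multiplos a b out) := by unfold Spec_soma_multiplos; infer_instance

-- ===== CLAIM (what is proved, stated in full; the proofs are below) =====
def Claim_equal_soma_multiplos : Prop := ∀ (a : Int) (b : Int), Dom_soma_multiplos a b → Pre_soma_multiplos a b → Spec_soma_multiplos a b (soma_multiplos a b)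

-- ===== LEMMAS AND PROOFS =====

-- The Euclid loop computes Int.gcd on nonnegative inputs.
theorem pvGcdLoop_eq (g : Int) (r : Int) (hg : 0 ≤ g) (hr : 0 ≤ r) :
    pvGcdLoop g r = (Int.gcd g r : Int) := by
  induction g, r using pvGcdLoop.induct with
  | case1 g =>
    rw [pvGcdLoop]
    simp [Int.natAbs_of_nonneg hg]
  | case2 g r h ih =>
    have hrpos : 0 < r := lt_of_le_of_ne hr (Ne.symm h)
    rw [pvGcdLoop]
    simp only [h, dite_false]
    rw [PySem.Int.mod_eq_emod_of_pos hrpos] at *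
    rw [ih hr (Int.emod_nonneg g (by omega))]
    congr 1
    conv_rhs => rw [show g = g % r + g / r * r from by
      rw [add_comm, mul_comm]; exact (Int.ediv_add_emod g r).symm]
    rw [Int.gcd_comm (g % r + g / r * r) r, Int.gcd_add_mul_right_right]

-- one step of the arithmetic series: pvTri (m+1) d adds m+1 exactly when d ∣ m+1
theorem pvTri_succ (d : Int) (hd : 0 < d) (m : Int) :
    pvTri (m + 1) d = pvTri m d + (if d ∣ (m + 1) then m + 1 else 0) := by
  have hd2 : (0 : Int) < 2 := by norm_num
  unfold pvTri
  rw [PySem.Int.floordiv_eq_ediv_of_pos hd, PySem.Int.floordiv_eq_ediv_of_pos hd,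
      PySem.Int.floordiv_eq_ediv_of_pos hd2, PySem.Int.floordiv_eq_ediv_of_pos hd2]
  by_cases h : d ∣ (m + 1)
  · obtain ⟨q, hq⟩ := h
    have hq1 : (m + 1) / d = q := by rw [hq]; exact Int.mul_ediv_cancel_left q (by omega)
    have hmd : d * (q - 1) = d * q - d := by ring
    have hq0 : m / d = q - 1 :=
      ((Int.ediv_emod_unique (a := m) (b := d) (r := d - 1) (q := q - 1) hd).mpr
        ⟨by linarith, by omega, by omega⟩).1
    rw [hq1, hq0, if_pos ⟨q, hq⟩]
    obtain ⟨j, hj⟩ := Int.even_mul_succ_self q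
    obtain ⟨j2, hj2⟩ := Int.even_mul_succ_self (q - 1)
    have e1 : d * q * (q + 1) = 2 * (d * j) := by rw [mul_assoc, hj]; ring
    have e2 : d * (q - 1) * (q - 1 + 1) = 2 * (d * j2) := by rw [mul_assoc, hj2]; ring
    rw [e1, e2, Int.mul_ediv_cancel_left _ two_ne_zero, Int.mul_ediv_cancel_left _ two_ne_zero]
    have key : q * (q + 1) = (q - 1) * (q - 1 + 1) + 2 * q := by ring
    have hjq : j = j2 + q := by linarith
    rw [hjq, hq]; ring
  · rw [if_neg h]
    have hne : (m + 1) % d ≠ 0 := fun hc => h (Int.dvd_of_emod_eq_zero hc)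
    have hb1 : 0 ≤ (m + 1) % d := Int.emod_nonneg _ (by omega)
    have hb2 : (m + 1) % d < d := Int.emod_lt_of_pos _ hd
    have hdiv : d * ((m + 1) / d) + (m + 1) % d = m + 1 := Int.ediv_add_emod (m + 1) d
    have heq : m / d = (m + 1) / d :=
      ((Int.ediv_emod_unique (a := m) (b := d) (r := (m + 1) % d - 1) (q := (m + 1) / d) hd).mpr
        ⟨by linarith, by omega, by omega⟩).1
    rw [heq, add_zero]

-- Gauss/closed-form lemma: pvTri m d is the sum of the multiples of d in [0, m].
theorem pvTri_sum (d : Int) (hd : 0 < d) (m : Nat) :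
    ((PySem.List.pyRange 0 ((m : Int) + 1) 1).map (fun i => if d ∣ i then i else 0)).sum
      = pvTri (m : Int) d := by
  induction m with
  | zero =>
    rw [show ((0 : Nat) : Int) + 1 = 0 + 1 from by norm_num, PySem.List.pyRange_one_singleton]
    have h0 : PySem.Int.floordiv 0 d = 0 := by
      rw [PySem.Int.floordiv_eq_ediv_of_pos hd]; simp
    simp [pvTri, h0]
  | succ m ih =>
    have hcast : ((m + 1 : Nat) : Int) = (m : Int) + 1 := by push_cast; ring
    rw [hcast, PySem.List.pyRange_one_succ_right (by positivity),
        List.map_append, List.sum_append, ih, List.map_singleton, List.sum_singleton,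
        pvTri_succ d hd ((m : Int))]

-- A's loop body as a mapped sum
theorem foldl_body (a : Int) (b : Int) (xs : List Int) (s : Int) :
    xs.foldl (fun soma i => if a ∣ i then soma + i else if b ∣ i then soma + i else soma) s
      = s + (xs.map (fun i => if a ∣ i ∨ b ∣ i then i else 0)).sum := by
  induction xs generalizing s with
  | nil => simp
  | cons hd tl ih =>
    simp only [List.foldl_cons, List.map_cons, List.sum_cons]
    by_cases h1 : a ∣ hd
    · rw [if_pos h1, ih, if_pos (Or.inl h1)]; ring
    · by_cases h2 : b ∣ hd
      · rw [if_neg h1, if_pos h2, ih, if_pos (Or.inr h2)]; ring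
      · rw [if_neg h1, if_neg h2, ih, if_neg (by tauto)]; ring

-- inclusion-exclusion on a mapped sum
theorem sum_ie (f f1 f2 f3 : Int → Int) (xs : List Int)
    (h : ∀ i ∈ xs, f i = f1 i + f2 i - f3 i) :
    (xs.map f).sum = (xs.map f1).sum + (xs.map f2).sum - (xs.map f3).sum := by
  induction xs with
  | nil => simp
  | cons hd tl ih =>
    simp only [List.map_cons, List.sum_cons]
    rw [h hd (by simp), ih (fun i hi => h i (by simp [hi]))]
    ring

-- ===== VERDICT (by name: the statement is the Claim_ definition above) =====
theorem soma_multiplos_spec : Claim_equal_soma_multiplos := by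
  intro a b _ hpre
  obtain ⟨ha, hb⟩ := hpre
  unfold Spec_soma_multiplos soma_multiplos soma_multiplos_alt
  by_cases hn : max a b * 10 < 0
  · rw [if_pos hn, PySem.List.pyRange_one_eq_nil (by omega)]
    rfl
  · rw [not_lt] at hn
    rw [if_neg (not_lt.mpr hn)]
    have hx : (0 : Int) < |a| := abs_pos.mpr ha
    have hy : (0 : Int) < |b| := abs_pos.mpr hb
    have hg : pvGcdLoop |a| |b| = (Int.gcd a b : Int) := by
      rw [pvGcdLoop_eq _ _ (abs_nonneg a) (abs_nonneg b)]
      congr 1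
      simp [Int.gcd, Int.natAbs_abs]
    have hgpos : (0 : Int) < (Int.gcd a b : Int) := by
      exact_mod_cast Int.gcd_pos_iff.mpr (Or.inl ha)
    have hl : PySem.Int.floordiv (|a| * |b|) (pvGcdLoop |a| |b|) = (Int.lcm a b : Int) := by
      rw [hg, PySem.Int.floordiv_eq_ediv_of_pos hgpos]
      have hab : |a| * |b| = (Int.gcd a b : Int) * (Int.lcm a b : Int) := by
        rw [Int.abs_eq_natAbs, Int.abs_eq_natAbs]
        exact_mod_cast (Int.gcd_mul_lcm a b).symm
      rw [hab, Int.mul_ediv_cancel_left _ (by omega)]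
    rw [hl]
    have hlpos : (0 : Int) < (Int.lcm a b : Int) := by exact_mod_cast Int.lcm_pos ha hb
    have hbody : (fun (soma i : Int) =>
        if PySem.Int.mod i a = 0 then soma + i
        else if PySem.Int.mod i b = 0 then soma + i else soma)
        = fun (soma i : Int) => if a ∣ i then soma + i else if b ∣ i then soma + i else soma := by
      funext soma i
      simp [PySem.Int.mod_eq_zero_iff_dvd]
    rw [hbody, foldl_body, zero_add]
    obtain ⟨m, hm⟩ : ∃ m : Nat, max a b * 10 = (m : Int) :=
      ⟨(max a b * 10).toNat, (Int.toNat_of_nonneg hn).symm⟩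
    rw [hm]
    rw [sum_ie _ (fun i => if |a| ∣ i then i else 0) (fun i => if |b| ∣ i then i else 0)
        (fun i => if ((Int.lcm a b : Int)) ∣ i then i else 0) _ ?_]
    · rw [pvTri_sum _ hx, pvTri_sum _ hy, pvTri_sum _ hlpos]
    · intro i _
      have hdvd : ((Int.lcm a b : Int) ∣ i) ↔ (a ∣ i ∧ b ∣ i) := by
        rw [Int.coe_lcm]; exact lcm_dvd_iff
      by_cases h1 : a ∣ i <;> by_cases h2 : b ∣ i <;>
        simp [h1, h2, hdvd, abs_dvd]
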